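-- pv_equiv track=rewrite | github.com/adi0900/advent-of-code | Day8/day08_01.py | compute_antinodes_pairwise
-- ===== SOURCE A (Python) =====
-- from typing import List, Set, Tuple, Dict
-- from collections import defaultdict
--
-- def compute_antinodes_pairwise(grid: List[str]) -> Set[Tuple[int, int]]:
--     """
--     Computes unique antinode positions using the pairwise method.
--
--     :param grid: A list of strings representing the grid map.
--     :return: A set of unique antinode positions.
--     """
--     rows = len(grid)
--     cols = len(grid[0]) if rows > 0 else 0
--
--     antennas_by_freq = defaultdict(list)
--     for r in range(rows):
--         for c in range(cols):
--             ch = grid[r][c]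
--             if ch != '.':
--                 antennas_by_freq[ch].append((r, c))
--
--     antinodes = set()
--     for coords in antennas_by_freq.values():
--         n = len(coords)
--         if n < 2:
--             continue
--
--         for i in range(n):
--             rA, cA = coords[i]
--             for j in range(i + 1, n):
--                 rB, cB = coords[j]
--
--                 # Compute P1 = 2B - A
--                 p1_r, p1_c = 2 * rB - rA, 2 * cB - cA
--                 if 0 <= p1_r < rows and 0 <= p1_c < cols:
--                     antinodes.add((p1_r, p1_c))
--
--                 # Compute P2 = 2A - B
--                 p2_r, p2_c = 2 * rA - rB, 2 * cA - cB
--                 if 0 <= p2_r < rows and 0 <= p2_c < cols: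
--                     antinodes.add((p2_r, p2_c))
--
--     return antinodes
-- ===== SOURCE B (Python) =====
-- def compute_antinodes_pairwise(grid):
--     """
--     Staged-passes reformulation: flatten all antennas into one scan-order
--     record, take the distinct frequencies in first-appearance order, select
--     each frequency's coordinates by a filter pass, and pair them
--     combinations-style by repeatedly splitting off the head, bulk-updating
--     the answer set with each head's in-bounds candidate stream.
--     """
--     rows = len(grid)
--     cols = len(grid[0]) if rows else 0
--
--     # pass 1: flat scan-order record of every antenna as (frequency, position)
--     ants = [(row[c], (r, c)) for r, row in enumerate(grid) for c in range(cols)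
--             if row[c] != '.']
--
--     # pass 2: distinct frequencies, first-appearance order
--     freqs = list(dict.fromkeys(ch for ch, _ in ants))
--
--     # pass 3: per frequency, select its coordinates and pair head-vs-rest
--     out = set()
--     for f in freqs:
--         coords = [p for ch, p in ants if ch == f]
--         while len(coords) >= 2:
--             ra, ca = coords[0]
--             coords = coords[1:]
--             out.update(q for rb, cb in coords
--                          for q in ((2 * rb - ra, 2 * cb - ca),
--                                    (2 * ra - rb, 2 * ca - cb))
--                          if 0 <= q[0] < rows and 0 <= q[1] < cols)
--     return out
-- ===== Notes on version B (the rewrite author's own statement) =====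
-- stated objective: alternative
-- what changed: A buckets antennas into a defaultdict in one grid pass and runs nested index loops over each bucket, mutating a set with per-pair bounds-checked adds; B is a staged pipeline with no bucket dict and no index arithmetic: flatten all antennas to one (freq, pos) record, dedup the frequencies via dict.fromkeys, select each frequency's coordinates by a filter pass, and pair them combinations-style by repeatedly splitting off the head, bulk-updating the answer set with each head's in-bounds candidate stream.
import Mathlib
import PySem

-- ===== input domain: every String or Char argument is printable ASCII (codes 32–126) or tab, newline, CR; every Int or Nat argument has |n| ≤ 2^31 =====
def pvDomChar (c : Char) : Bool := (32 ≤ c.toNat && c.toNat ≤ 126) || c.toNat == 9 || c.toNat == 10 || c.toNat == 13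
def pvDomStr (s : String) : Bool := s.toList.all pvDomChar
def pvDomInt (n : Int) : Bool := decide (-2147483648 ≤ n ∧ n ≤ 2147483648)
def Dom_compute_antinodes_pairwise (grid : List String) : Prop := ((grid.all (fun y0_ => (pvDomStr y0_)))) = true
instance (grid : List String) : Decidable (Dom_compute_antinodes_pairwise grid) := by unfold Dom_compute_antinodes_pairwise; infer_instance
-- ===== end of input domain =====

-- B replaces A's bucket-dict grouping plus nested index loops with per-pair set adds
-- by a staged pipeline: flat antenna record, frequency dedup, per-frequency filter
-- pass, head-vs-rest (combinations-style) pairing that bulk-updates the answer set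
-- with each head's in-bounds candidate stream (objective: alternative).

-- ===== PORT A =====
-- grid[r][c] is ported through the code-point list of the row (Python string indexing is exact on code points).
def compute_antinodes_pairwise (grid : List String) : List (Int × Int) :=
  let rows : Int := grid.length
  let cols : Int := if rows > 0 then PySem.Str.len (PySem.List.pyGetD grid 0 "") else 0
  let antennas_by_freq : PySem.Dict Char (List (Int × Int)) :=
    (PySem.List.pyRange 0 rows 1).foldl (fun d r =>
      (PySem.List.pyRange 0 cols 1).foldl (fun d c =>
        let ch := PySem.List.pyGetD (PySem.List.pyGetD grid r "").toList c ' '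
        if ch ≠ '.' then d.modify ch [] (· ++ [(r, c)]) else d) d) PySem.Dict.empty
  antennas_by_freq.values.foldl (fun antinodes coords =>
    let n : Int := coords.length
    if n < 2 then antinodes else
      (PySem.List.pyRange 0 n 1).foldl (fun antinodes i =>
        let pA := PySem.List.pyGetD coords i (0, 0)
        (PySem.List.pyRange (i + 1) n 1).foldl (fun antinodes j =>
          let pB := PySem.List.pyGetD coords j (0, 0)
          let antinodes :=
            if 0 ≤ 2 * pB.1 - pA.1 ∧ 2 * pB.1 - pA.1 < rows ∧ 0 ≤ 2 * pB.2 - pA.2 ∧ 2 * pB.2 - pA.2 < cols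
            then PySem.Set.add antinodes (2 * pB.1 - pA.1, 2 * pB.2 - pA.2) else antinodes
          if 0 ≤ 2 * pA.1 - pB.1 ∧ 2 * pA.1 - pB.1 < rows ∧ 0 ≤ 2 * pA.2 - pB.2 ∧ 2 * pA.2 - pB.2 < cols
          then PySem.Set.add antinodes (2 * pA.1 - pB.1, 2 * pA.2 - pB.2) else antinodes) antinodes) antinodes)
    PySem.Set.empty

-- ===== PORT B =====
-- B's flat comprehension [(row[c], (r, c)) for r, row in enumerate(grid) for c in range(cols) if row[c] != '.']
def pvAnts (grid : List String) (cols : Int) : List (Char × (Int × Int)) :=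
  (PySem.List.enumerate grid).flatMap (fun rr =>
    (PySem.List.pyRange 0 cols 1).filterMap (fun c =>
      let ch := PySem.List.pyGetD rr.2.toList c ' '
      if ch ≠ '.' then some (ch, (rr.1, c)) else none))

-- B's 'while len(coords) >= 2: head, coords = coords[0], coords[1:]; out.update(...)'
-- pairing loop, as the structural recursion on the list (a one-element coords updates
-- with an empty stream and stops, like the loop).
def pvPairLoop (rows cols : Int) : List (Int × Int) → PySem.Set (Int × Int) → PySem.Set (Int × Int)
  | [], s => s
  | p :: rest, s =>
      pvPairLoop rows cols rest (PySem.Set.update s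
        (rest.flatMap (fun q =>
          ([(2 * q.1 - p.1, 2 * q.2 - p.2), (2 * p.1 - q.1, 2 * p.2 - q.2)] : List (Int × Int)).filter
            (fun a => decide (0 ≤ a.1) && decide (a.1 < rows) && decide (0 ≤ a.2) && decide (a.2 < cols)))))

def compute_antinodes_pairwise_alt (grid : List String) : List (Int × Int) :=
  let rows : Int := grid.length
  let cols : Int := if rows > 0 then PySem.Str.len (PySem.List.pyGetD grid 0 "") else 0
  let ants := pvAnts grid cols
  let freqs : List Char := PySem.List.dedup (ants.map (·.1))
  freqs.foldl (fun out f =>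
    pvPairLoop rows cols ((ants.filter (fun p => p.1 == f)).map (·.2)) out) PySem.Set.empty

-- ===== PRECONDITION & SPEC =====
-- Pre_ excludes exactly the grids on which A raises IndexError: a later row shorter than row 0.
def Pre_compute_antinodes_pairwise (grid : List String) : Prop :=
  ∀ s ∈ grid, PySem.Str.len (PySem.List.pyGetD grid 0 "") ≤ PySem.Str.len s
instance (grid : List String) : Decidable (Pre_compute_antinodes_pairwise grid) := by unfold Pre_compute_antinodes_pairwise; infer_instance
def pvWitness_compute_antinodes_pairwise : List String := ["a.a", ".b.", "a.b"]

def Spec_compute_antinodes_pairwise (grid : List String) (out : List (Int × Int)) : Prop := out = compute_antinodes_pairwise_alt grid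
instance (grid : List String) (out : List (Int × Int)) : Decidable (Spec_compute_antinodes_pairwise grid out) := by unfold Spec_compute_antinodes_pairwise; infer_instance

-- ===== CLAIM (what is proved, stated in full; the proofs are below) =====
def Claim_equal_compute_antinodes_pairwise : Prop := ∀ (grid : List String), Dom_compute_antinodes_pairwise grid → Pre_compute_antinodes_pairwise grid → Spec_compute_antinodes_pairwise grid (compute_antinodes_pairwise grid)

-- ===== LEMMAS AND PROOFS =====

-- the per-pair filtered candidate list both programs produce for a directed pair (p, q)
def pvCand (rows cols : Int) (p q : Int × Int) : List (Int × Int) :=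
  ([(2 * q.1 - p.1, 2 * q.2 - p.2), (2 * p.1 - q.1, 2 * p.2 - q.2)] : List (Int × Int)).filterMap (fun a =>
    if 0 ≤ a.1 ∧ a.1 < rows ∧ 0 ≤ a.2 ∧ a.2 < cols then some a else none)

-- A's per-pair step: add 2B-A then 2A-B, each under its bounds check.
def pvStep (rows cols : Int) (s : List (Int × Int)) (pA pB : Int × Int) : List (Int × Int) :=
  let s' := if 0 ≤ 2 * pB.1 - pA.1 ∧ 2 * pB.1 - pA.1 < rows ∧ 0 ≤ 2 * pB.2 - pA.2 ∧ 2 * pB.2 - pA.2 < cols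
            then PySem.Set.add s (2 * pB.1 - pA.1, 2 * pB.2 - pA.2) else s
  if 0 ≤ 2 * pA.1 - pB.1 ∧ 2 * pA.1 - pB.1 < rows ∧ 0 ≤ 2 * pA.2 - pB.2 ∧ 2 * pA.2 - pB.2 < cols
  then PySem.Set.add s' (2 * pA.1 - pB.1, 2 * pA.2 - pB.2) else s'

def pvPairsFlat (rows cols : Int) : List (Int × Int) → List (Int × Int)
  | [] => []
  | x :: xs => xs.flatMap (pvCand rows cols x) ++ pvPairsFlat rows cols xs

lemma pvFoldl_flatMap {α β γ : Type} (l : List α) (f : α → List β) (g : γ → β → γ) (init : γ) :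
    (l.flatMap f).foldl g init = l.foldl (fun s x => (f x).foldl g s) init := by
  induction l generalizing init with
  | nil => rfl
  | cons x xs ih => simp [List.foldl_append, ih]

lemma pvFoldl_if_filterMap {α β γ : Type} (l : List α) (p : α → Prop) [DecidablePred p]
    (h : α → β) (g : γ → β → γ) (init : γ) :
    l.foldl (fun d x => if p x then g d (h x) else d) init
    = (l.filterMap (fun x => if p x then some (h x) else none)).foldl g init := by
  induction l generalizing init with
  | nil => rfl
  | cons x xs ih =>
    simp only [List.foldl_cons, List.filterMap_cons]
    split_ifs with hx <;> simp [ih]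

-- A's grid scan builds the same association as a fold of modify over B's flat antenna record.
lemma pvBuild_eq (grid : List String) (cols : Int) :
    (PySem.List.pyRange 0 (grid.length : Int) 1).foldl (fun d r =>
      (PySem.List.pyRange 0 cols 1).foldl (fun d c =>
        let ch := PySem.List.pyGetD (PySem.List.pyGetD grid r "").toList c ' '
        if ch ≠ '.' then d.modify ch [] (· ++ [(r, c)]) else d) d) PySem.Dict.empty
    = (pvAnts grid cols).foldl (fun d p => d.modify p.1 [] (· ++ [p.2])) PySem.Dict.empty := by
  unfold pvAnts
  rw [PySem.List.enumerate_eq_map_pyRange grid "", List.flatMap_map]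
  simp only [PySem.List.len_eq]
  rw [pvFoldl_flatMap]
  apply PySem.List.foldl_congr_mem
  intro d r _
  exact pvFoldl_if_filterMap (PySem.List.pyRange 0 cols 1)
    (fun c => PySem.List.pyGetD (PySem.List.pyGetD grid r "").toList c ' ' ≠ '.')
    (fun c => (PySem.List.pyGetD (PySem.List.pyGetD grid r "").toList c ' ', (r, c)))
    (fun d p => d.modify p.1 [] (· ++ [p.2])) d

-- the dict's values list is B's per-frequency filter passes, frequencies in first-appearance order
lemma pvValues_eq (ants : List (Char × (Int × Int))) :
    (ants.foldl (fun d p => d.modify p.1 [] (· ++ [p.2])) PySem.Dict.empty).values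
    = (PySem.List.dedup (ants.map (·.1))).map
        (fun f => (ants.filter (fun p => p.1 == f)).map (·.2)) := by
  have hnd : (ants.foldl (fun d p => d.modify p.1 [] (· ++ [p.2])) PySem.Dict.empty).keys.Nodup := by
    have := PySem.Dict.nodup_keys_foldl_modify_key ants (fun p => p.1) []
      (fun _ p => (· ++ [p.2])) PySem.Dict.empty (by simp [PySem.Dict.keys_empty])
    simpa using this
  rw [PySem.Dict.values_eq_map_keys _ hnd []]
  have hkeys : (ants.foldl (fun d p => d.modify p.1 [] (· ++ [p.2])) PySem.Dict.empty).keys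
      = PySem.List.dedup (ants.map (·.1)) := by
    have := PySem.Dict.keys_foldl_modify_key ants (fun p => p.1) []
      (fun _ p => (· ++ [p.2])) PySem.Dict.empty
    rw [PySem.List.dedup_eq_ofList, PySem.Set.ofList_eq_foldl]
    simpa [PySem.Dict.keys_empty] using this
  rw [hkeys]
  refine List.map_congr_left (fun k _ => ?_)
  rw [PySem.Dict.getD_foldl_modify_append]
  simp [PySem.Dict.getD_empty]

-- the deferred Bool bounds filter is the per-pair Prop filterMap
lemma pvFilter_eq_cand (rows cols : Int) (l : List (Int × Int)) :
    l.filter (fun q => decide (0 ≤ q.1) && decide (q.1 < rows) && decide (0 ≤ q.2) && decide (q.2 < cols))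
    = l.filterMap (fun a => if 0 ≤ a.1 ∧ a.1 < rows ∧ 0 ≤ a.2 ∧ a.2 < cols then some a else none) := by
  induction l with
  | nil => rfl
  | cons x xs ih =>
    simp only [List.filter_cons, List.filterMap_cons]
    by_cases h : 0 ≤ x.1 ∧ x.1 < rows ∧ 0 ≤ x.2 ∧ x.2 < cols
    · obtain ⟨h1, h2, h3, h4⟩ := h
      simp [h1, h2, h3, h4, ih]
    · have hb : (decide (0 ≤ x.1) && decide (x.1 < rows) && decide (0 ≤ x.2) && decide (x.2 < cols)) = false := by
        simp only [Bool.and_eq_false_iff, decide_eq_false_iff_not]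
        by_contra hc
        push Not at hc
        exact h ⟨by tauto, by tauto, by tauto, by tauto⟩
      simp [hb, h, ih]

-- B's head-vs-rest bulk-update loop is a fold of Set.add over the flat candidate list
lemma pvPairLoop_eq (rows cols : Int) (l : List (Int × Int)) :
    ∀ s, pvPairLoop rows cols l s = (pvPairsFlat rows cols l).foldl PySem.Set.add s := by
  induction l with
  | nil => intro s; rfl
  | cons p rest ih =>
    intro s
    have hs : rest.flatMap (fun q =>
        ([(2 * q.1 - p.1, 2 * q.2 - p.2), (2 * p.1 - q.1, 2 * p.2 - q.2)] : List (Int × Int)).filter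
          (fun a => decide (0 ≤ a.1) && decide (a.1 < rows) && decide (0 ≤ a.2) && decide (a.2 < cols)))
        = rest.flatMap (pvCand rows cols p) :=
      List.flatMap_congr (fun q _ => pvFilter_eq_cand rows cols _)
    simp only [pvPairLoop, pvPairsFlat, List.foldl_append, ih, hs]
    rfl

lemma pvStep_eq_foldl (rows cols : Int) (s : List (Int × Int)) (p q : Int × Int) :
    pvStep rows cols s p q = (pvCand rows cols p q).foldl PySem.Set.add s := by
  simp only [pvStep, pvCand, List.filterMap]
  split_ifs <;> simp [List.foldl]

lemma pvInner_eq (rows cols : Int) (x : Int × Int) (xs : List (Int × Int)) :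
    ∀ s, xs.foldl (fun s y => pvStep rows cols s x y) s
      = (xs.flatMap (pvCand rows cols x)).foldl PySem.Set.add s := by
  induction xs with
  | nil => intro s; simp
  | cons y ys ih =>
    intro s
    simp only [List.foldl_cons, List.flatMap_cons, List.foldl_append]
    rw [ih, pvStep_eq_foldl]

-- A's nested index loops over one group equal a fold of Set.add over the flat candidate list.
lemma pvPairsA_eq (rows cols : Int) (full : List (Int × Int)) :
    ∀ (tail : List (Int × Int)) (k : Nat), full.drop k = tail → ∀ s,
    (PySem.List.pyRange (k : Int) full.length 1).foldl (fun s i =>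
      (PySem.List.pyRange (i + 1) full.length 1).foldl (fun s j =>
        pvStep rows cols s (PySem.List.pyGetD full i (0, 0)) (PySem.List.pyGetD full j (0, 0))) s) s
    = (pvPairsFlat rows cols tail).foldl PySem.Set.add s := by
  intro tail
  induction tail with
  | nil =>
    intro k hk s
    have hlen : full.length ≤ k := by
      by_contra h
      exact absurd hk (by simp [List.drop_eq_nil_iff]; omega)
    rw [PySem.List.pyRange_one_eq_nil (by exact_mod_cast hlen)]
    simp [pvPairsFlat]
  | cons x xs ih =>
    intro k hk s
    have hklen : k < full.length := by
      by_contra h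
      rw [List.drop_eq_nil_iff.mpr (by omega)] at hk; exact absurd hk (by simp)
    have hx : full[k]? = some x := by
      have h1 : (full.drop k)[0]? = some x := by rw [hk]; rfl
      simpa [List.getElem?_drop] using h1
    have hxx : PySem.List.pyGetD full (k : Int) (0, 0) = x := by
      simp [PySem.List.pyGetD_natCast, List.getD_eq_getElem?_getD, hx]
    have hdrop : full.drop (k + 1) = xs := by
      have : (full.drop k).drop 1 = xs := by rw [hk]; rfl
      simpa [List.drop_drop, Nat.add_comm] using this
    rw [PySem.List.pyRange_one_cons (by exact_mod_cast hklen)]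
    simp only [List.foldl_cons]
    rw [show ((k : Int) + 1) = ((k + 1 : Nat) : Int) by push_cast; ring] at *
    have hinner : ∀ s,
        (PySem.List.pyRange ((k + 1 : Nat) : Int) full.length 1).foldl (fun s j =>
          pvStep rows cols s (PySem.List.pyGetD full (k : Int) (0, 0)) (PySem.List.pyGetD full j (0, 0))) s
        = xs.foldl (fun s y => pvStep rows cols s (PySem.List.pyGetD full (k : Int) (0, 0)) y) s := by
      intro s
      have := PySem.List.foldl_pyRange_pyGetD full (0, 0)
        (fun s y => pvStep rows cols s (PySem.List.pyGetD full (k : Int) (0, 0)) y) s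
        (a := ((k + 1 : Nat) : Int)) (by positivity)
      simp only [PySem.List.len_eq] at this ⊢
      rw [this]
      simp [hdrop]
    rw [hinner, hxx, ih (k + 1) hdrop, pvInner_eq]
    simp [pvPairsFlat]

-- A's per-group body (with its n < 2 guard) as a fold of Set.add over the flat candidate list
lemma pvGroup_eq (rows cols : Int) (coords : List (Int × Int)) (s : List (Int × Int)) :
    (if (coords.length : Int) < 2 then s else
      (PySem.List.pyRange 0 (coords.length : Int) 1).foldl (fun s i =>
        (PySem.List.pyRange (i + 1) (coords.length : Int) 1).foldl (fun s j =>
          pvStep rows cols s (PySem.List.pyGetD coords i (0, 0)) (PySem.List.pyGetD coords j (0, 0))) s) s)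
    = (pvPairsFlat rows cols coords).foldl PySem.Set.add s := by
  split_ifs with h
  · rcases coords with _ | ⟨x, _ | ⟨y, zs⟩⟩
    · simp [pvPairsFlat]
    · simp [pvPairsFlat]
    · exfalso; simp [List.length_cons] at h; omega
  · have hA := pvPairsA_eq rows cols coords coords 0 (by simp) s
    simp only [Nat.cast_zero] at hA
    exact hA

-- ===== VERDICT (by name: the statement is the Claim_ definition above) =====
theorem compute_antinodes_pairwise_spec : Claim_equal_compute_antinodes_pairwise := by
  intro grid _hdom _hpre
  unfold Spec_compute_antinodes_pairwise compute_antinodes_pairwise compute_antinodes_pairwise_alt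
  dsimp only
  rw [pvBuild_eq, pvValues_eq, List.foldl_map]
  -- per frequency, A's group body and B's bulk-update loop are the same fold of Set.add
  apply PySem.List.foldl_congr_mem
  intro acc f _
  rw [pvPairLoop_eq]
  exact pvGroup_eq _ _ _ acc
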